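-- pv_equiv track=rewrite | github.com/Diego-Escorche/mystery_game | src/engine/interrogations.py | _strip_clue_tags
-- ===== SOURCE A (Python) =====
-- def _strip_clue_tags(text: str) -> str:
--     # elimina los segmentos [CLUE: ...]
--     out = []
--     i = 0
--     while i < len(text):
--         start = text.find("[CLUE:", i)
--         if start == -1:
--             out.append(text[i:])
--             break
--         out.append(text[i:start])
--         end = text.find("]", start)
--         if end == -1:
--             # tag mal cerrado; corta
--             break
--         i = end + 1
--     return "".join(out).strip()
-- ===== SOURCE B (Python) =====
-- def _strip_clue_tags(text: str) -> str:
--     # single left-to-right character scan (state machine) instead of repeated find() jumps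
--     out = []
--     j = 0
--     n = len(text)
--     while j < n:
--         if text.startswith("[CLUE:", j):
--             k = text.find("]", j)
--             if k == -1:
--                 break  # unclosed tag: discard the rest
--             j = k + 1
--         else:
--             out.append(text[j])
--             j += 1
--     return "".join(out).strip()
-- ===== Notes on version B (the rewrite author's own statement) =====
-- stated objective: alternative
-- what changed: Replaces A's index loop of repeated find jumps for the tag opener plus chunk slicing with a single character-by-character state-machine scan that copies each character unless a clue tag starts at that position, skipping to just past the closing bracket.
import Mathlib
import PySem

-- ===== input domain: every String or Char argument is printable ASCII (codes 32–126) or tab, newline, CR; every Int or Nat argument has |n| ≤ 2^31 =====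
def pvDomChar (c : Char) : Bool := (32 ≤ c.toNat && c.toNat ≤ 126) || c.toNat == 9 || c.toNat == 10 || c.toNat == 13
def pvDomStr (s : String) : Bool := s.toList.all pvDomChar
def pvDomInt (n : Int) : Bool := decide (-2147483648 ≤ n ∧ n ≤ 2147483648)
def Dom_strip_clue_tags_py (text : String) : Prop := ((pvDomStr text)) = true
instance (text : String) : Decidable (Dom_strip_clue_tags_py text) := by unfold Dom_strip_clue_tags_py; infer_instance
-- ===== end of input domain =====

-- B replaces A's find-and-jump index loop by a one-pass per-character state-machine scan (alternative decomposition, same cost).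

-- ===== PORT A =====
-- A's while loop, literal: state i (Python int), accumulated output chunks (joined as we go);
-- fuel = |text| + 1 iterations always suffices because i strictly increases each continuing iteration.
def pvLoopA (cs : List Char) (fuel : Nat) (i : Int) (acc : List Char) : List Char :=
  match fuel with
  | 0 => acc
  | fuel + 1 =>
    if i < (cs.length : Int) then
      let start := PySem.Chars.findFrom cs "[CLUE:".toList i
      if start = -1 then acc ++ PySem.Chars.slice cs (some i) none
      else
        let acc2 := acc ++ PySem.Chars.slice cs (some i) (some start)
        let e := PySem.Chars.findFrom cs "]".toList start
        if e = -1 then acc2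
        else pvLoopA cs fuel (e + 1) acc2
    else acc

def strip_clue_tags_py (text : String) : String :=
  String.ofList (PySem.Chars.strip (pvLoopA text.toList (text.toList.length + 1) 0 []))

-- ===== PORT B =====
-- B's character scan; text.startswith("[CLUE:", j) is startswith on the suffix (j ≥ 0 here);
-- well-founded on cs.length - j (k ≥ j when k ≠ -1, by PySem.Chars.findFrom_natCast_spec).
def pvScanB (cs : List Char) (j : Nat) (acc : List Char) : List Char :=
  if h : j < cs.length then
    if PySem.Chars.startswith (cs.drop j) "[CLUE:".toList then
      let k := PySem.Chars.findFrom cs "]".toList (j : Int)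
      if hk : k = -1 then acc
      else pvScanB cs (k + 1).toNat acc
    else pvScanB cs (j + 1) (acc ++ [cs[j]])
  else acc
termination_by cs.length - j
decreasing_by
  · have hspec := PySem.Chars.findFrom_natCast_spec cs "]".toList j (by omega) (by simpa using hk)
    have h1 : "]".toList <+: cs.drop (PySem.Chars.findFrom cs "]".toList (j : Int)).toNat := hspec.2.1
    have h2 : (PySem.Chars.findFrom cs "]".toList (j : Int)).toNat < cs.length := by
      by_contra hc
      rw [not_lt] at hc
      rw [List.drop_eq_nil_of_le hc] at h1
      simp at h1
    have h3 : (j : Int) ≤ PySem.Chars.findFrom cs "]".toList (j : Int) := hspec.1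
    omega
  · omega

def strip_clue_tags_py_alt (text : String) : String :=
  String.ofList (PySem.Chars.strip (pvScanB text.toList 0 []))

-- ===== PRECONDITION & SPEC =====
def Spec_strip_clue_tags_py (text : String) (out : String) : Prop := out = strip_clue_tags_py_alt text
instance (text : String) (out : String) : Decidable (Spec_strip_clue_tags_py text out) := by unfold Spec_strip_clue_tags_py; infer_instance

-- ===== CLAIM (what is proved, stated in full; the proofs are below) =====
def Claim_equal_strip_clue_tags_py : Prop := ∀ (text : String), Dom_strip_clue_tags_py text → Spec_strip_clue_tags_py text (strip_clue_tags_py text)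

-- ===== LEMMAS AND PROOFS =====

theorem scan_skip (cs : List Char) : ∀ (d j : Nat) (acc : List Char), j + d ≤ cs.length →
    (∀ m, j ≤ m → m < j + d → ¬ ("[CLUE:".toList <+: cs.drop m)) →
    pvScanB cs j acc = pvScanB cs (j + d) (acc ++ (cs.drop j).take d) := by
  intro d
  induction d with
  | zero => intro j acc _ _; simp
  | succ d ih =>
    intro j acc hlen hno
    have hj : j < cs.length := by omega
    have hsw : PySem.Chars.startswith (cs.drop j) "[CLUE:".toList = false := by
      rw [← Bool.not_eq_true, PySem.Chars.startswith_iff]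
      exact hno j le_rfl (by omega)
    conv_lhs => rw [pvScanB]
    simp only [hj, dif_pos, hsw, Bool.false_eq_true, if_false]
    rw [ih (j + 1) (acc ++ [cs[j]]) (by omega) (fun m hm1 hm2 => hno m (by omega) (by omega))]
    have h3 : j + (d + 1) = j + 1 + d := by omega
    have h4 : (cs.drop j).take (d + 1) = cs[j] :: (cs.drop (j + 1)).take d := by
      rw [List.drop_eq_getElem_cons hj, List.take_succ_cons]
    rw [h3, h4]
    simp [List.append_assoc]

theorem scanB_stop (cs : List Char) (j : Nat) (acc : List Char) (h : ¬ j < cs.length) :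
    pvScanB cs j acc = acc := by
  rw [pvScanB]; simp [h]

theorem main_lemma : ∀ (fuel : Nat) (cs : List Char) (i : Nat) (acc : List Char),
    i ≤ cs.length → cs.length - i < fuel →
    pvLoopA cs fuel (i : Int) acc = pvScanB cs i acc := by
  intro fuel
  induction fuel with
  | zero => intro cs i acc h1 h2; omega
  | succ fuel ih =>
    intro cs i acc hle hfuel
    by_cases hi : i < cs.length
    case neg =>
      have hcond : ¬ ((i : Int) < (cs.length : Int)) := by exact_mod_cast hi
      simp only [pvLoopA, if_neg hcond]
      rw [scanB_stop cs i acc hi]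
    case pos =>
      have hcond : (i : Int) < (cs.length : Int) := by exact_mod_cast hi
      simp only [pvLoopA, if_pos hcond]
      rw [PySem.Chars.findFrom_natCast cs _ i (le_of_lt hi)]
      by_cases h0 : PySem.Chars.find (cs.drop i) "[CLUE:".toList = -1
      · -- no tag from i on: A emits the tail, B copies it char by char
        rw [if_pos h0, if_pos rfl]
        have hno : ∀ m, i ≤ m → m < i + (cs.length - i) → ¬ ("[CLUE:".toList <+: cs.drop m) := by
          intro m hm1 _ hpre
          rw [PySem.Chars.find_eq_neg_one_iff] at h0
          have hsub : cs.drop m <:+ cs.drop i := by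
            have he : cs.drop m = (cs.drop i).drop (m - i) := by rw [List.drop_drop]; congr 1; omega
            rw [he]; exact List.drop_suffix _ _
          exact h0 (hpre.isInfix.trans hsub.isInfix)
        rw [scan_skip cs (cs.length - i) i acc (by omega) hno]
        rw [scanB_stop cs (i + (cs.length - i)) _ (by omega)]
        simp [PySem.Chars.slice_eq_listSlice, PySem.List.slice_from_natCast,
              List.take_of_length_le]
      · -- tag found at i + f0
        rw [if_neg h0]
        have h0' : 0 ≤ PySem.Chars.find (cs.drop i) "[CLUE:".toList := by
          have := PySem.Chars.neg_one_le_find (cs.drop i) "[CLUE:".toList; omega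
        obtain ⟨hpre, hmin⟩ := PySem.Chars.find_spec h0'
        set f0 := PySem.Chars.find (cs.drop i) "[CLUE:".toList with hf0
        have hfle : f0 ≤ ((cs.drop i).length : Int) := PySem.Chars.find_le_length _ _
        have hcast : (i : Int) + f0 = ((i + f0.toNat : Nat) : Int) := by push_cast; omega
        have hsle : i + f0.toNat ≤ cs.length := by
          rw [List.length_drop] at hfle; omega
        have hdropS : (cs.drop i).drop f0.toNat = cs.drop (i + f0.toNat) := by
          rw [List.drop_drop, Nat.add_comm]
        rw [hdropS] at hpre
        have hslt : i + f0.toNat < cs.length := by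
          by_contra hc
          rw [List.drop_eq_nil_of_le (by omega)] at hpre
          simp at hpre
        rw [if_neg (by omega), hcast,
            PySem.Chars.findFrom_natCast cs _ (i + f0.toNat) hsle]
        have hslice : PySem.Chars.slice cs (some ↑i) (some ((i + f0.toNat : Nat) : Int)) =
            (cs.drop i).take f0.toNat := by
          rw [PySem.Chars.slice_eq_listSlice,
              show ((i + f0.toNat : Nat) : Int) = (i : Int) + (f0.toNat : Int) by push_cast; ring,
              PySem.List.slice_natCast_add]
        have hno2 : ∀ m, i ≤ m → m < i + f0.toNat → ¬ ("[CLUE:".toList <+: cs.drop m) := by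
          intro m hm1 hm2 hp
          have he : cs.drop m = (cs.drop i).drop (m - i) := by rw [List.drop_drop]; congr 1; omega
          rw [he] at hp
          exact hmin (m - i) (by omega) hp
        rw [scan_skip cs f0.toNat i acc (by omega) hno2]
        conv_rhs => rw [pvScanB]
        simp only [hslt, dif_pos]
        rw [(PySem.Chars.startswith_iff _ _).mpr hpre, if_pos rfl]
        rw [PySem.Chars.findFrom_natCast cs _ (i + f0.toNat) hsle]
        by_cases h1 : PySem.Chars.find (cs.drop (i + f0.toNat)) "]".toList = -1
        · rw [if_pos h1, if_pos rfl, hslice]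
          simp
        · rw [if_neg h1]
          have h1' : 0 ≤ PySem.Chars.find (cs.drop (i + f0.toNat)) "]".toList := by
            have := PySem.Chars.neg_one_le_find (cs.drop (i + f0.toNat)) "]".toList; omega
          obtain ⟨hpre2, hmin2⟩ := PySem.Chars.find_spec h1'
          set f1 := PySem.Chars.find (cs.drop (i + f0.toNat)) "]".toList with hf1
          have helt : i + f0.toNat + f1.toNat < cs.length := by
            by_contra hc
            rw [List.drop_drop] at hpre2
            rw [List.drop_eq_nil_of_le (by omega)] at hpre2
            simp at hpre2
          have hne : ¬ (((i + f0.toNat : Nat) : Int) + f1 = -1) := by omega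
          rw [if_neg hne, dif_neg hne]
          have hc2 : ((i + f0.toNat : Nat) : Int) + f1 + 1 =
              ((i + f0.toNat + f1.toNat + 1 : Nat) : Int) := by push_cast; omega
          have hc3 : (((i + f0.toNat : Nat) : Int) + f1 + 1).toNat =
              i + f0.toNat + f1.toNat + 1 := by omega
          rw [hc2, hslice]
          simp only [Int.toNat_natCast]
          exact ih cs (i + f0.toNat + f1.toNat + 1) (acc ++ (cs.drop i).take f0.toNat)
            (by omega) (by omega)

-- ===== VERDICT (by name: the statement is the Claim_ definition above) =====
theorem strip_clue_tags_py_spec : Claim_equal_strip_clue_tags_py := by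
  intro text _
  unfold Spec_strip_clue_tags_py strip_clue_tags_py strip_clue_tags_py_alt
  rw [show (0 : Int) = ((0 : Nat) : Int) by norm_num,
      main_lemma (text.toList.length + 1) text.toList 0 [] (by omega) (by omega)]
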